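-- pv_equiv track=rewrite | github.com/NahNoNaT/SeizurePrediction | app/services/clinical_workflow.py | _apply_min_consecutive
-- ===== SOURCE A (Python) =====
-- def _apply_min_consecutive(flags: list[bool], minimum_run: int) -> list[bool]:
--     if minimum_run <= 1:
--         return [bool(item) for item in flags]
--
--     derived = [False] * len(flags)
--     run_start: int | None = None
--     for index, is_high in enumerate(flags + [False]):
--         if is_high and run_start is None:
--             run_start = index
--             continue
--         if is_high:
--             continue
--         if run_start is not None and index - run_start >= minimum_run:
--             for flagged_index in range(run_start, index):
--                 derived[flagged_index] = True
--         run_start = None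
--     return derived
-- ===== SOURCE B (Python) =====
-- def _running_sums(values):
--     total = 0
--     sums = [0]
--     for v in values:
--         total += v
--         sums.append(total)
--     return sums
--
--
-- def _apply_min_consecutive(flags: list[bool], minimum_run: int) -> list[bool]:
--     # Morphological opening via prefix sums: erode (find every window of k
--     # consecutive True positions), then dilate (a position is kept iff some
--     # eroded window covers it); both steps are O(1) per position.
--     n = len(flags)
--     k = max(minimum_run, 1)
--     if k > n:
--         return [False] * n
--     prefix = _running_sums(1 if item else 0 for item in flags)
--     eroded = _running_sums(
--         1 if prefix[j + k] - prefix[j] == k else 0 for j in range(n - k + 1)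
--     )
--     return [
--         eroded[min(i, n - k) + 1] - eroded[max(0, i - k + 1)] > 0
--         for i in range(n)
--     ]
-- ===== Notes on version B (the rewrite author's own statement) =====
-- stated objective: alternative
-- what changed: Replaced run tracking entirely by a morphological opening computed with two prefix-sum arrays: an erosion marks every start of a window of k consecutive True values (window sum equals k), and a dilation keeps a position iff the count of eroded window starts covering it is positive; no run boundaries or run lengths are ever computed.
import Mathlib
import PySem

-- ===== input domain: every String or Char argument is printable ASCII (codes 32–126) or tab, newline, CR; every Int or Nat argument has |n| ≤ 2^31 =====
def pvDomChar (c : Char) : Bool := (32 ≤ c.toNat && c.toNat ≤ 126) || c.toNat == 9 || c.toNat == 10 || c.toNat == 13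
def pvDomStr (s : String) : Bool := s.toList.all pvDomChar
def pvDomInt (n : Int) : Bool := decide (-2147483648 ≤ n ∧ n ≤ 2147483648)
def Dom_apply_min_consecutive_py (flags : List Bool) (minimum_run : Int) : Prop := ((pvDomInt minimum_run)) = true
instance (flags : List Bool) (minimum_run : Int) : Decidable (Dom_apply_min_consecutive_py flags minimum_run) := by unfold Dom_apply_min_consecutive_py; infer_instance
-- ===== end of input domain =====

-- B replaces A's sentinel-based run tracking by a morphological opening computed with
-- two prefix-sum arrays (erosion: window sums; dilation: counts of covering windows);
-- objective: alternative (no runs or run lengths are ever computed).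

-- ===== PORT A =====
-- the sentinel loop over enumerate(flags + [False]) with state (derived, run_start)
def pvGoA (L : List Bool) (index : Nat) (derived : List Bool) (run_start : Option Nat) (m : Int) : List Bool :=
  match L with
  | [] => derived
  | is_high :: rest =>
    if is_high && (run_start == none) then
      pvGoA rest (index + 1) derived (some index) m
    else if is_high then
      pvGoA rest (index + 1) derived run_start m
    else
      let derived' :=
        match run_start with
        | some rs =>
          if (index : Int) - (rs : Int) ≥ m then
            -- for flagged_index in range(run_start, index): derived[flagged_index] = True
            (List.range' rs (index - rs)).foldl (fun d i => d.set i true) derived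
          else derived
        | none => derived
      pvGoA rest (index + 1) derived' none m

def apply_min_consecutive_py (flags : List Bool) (minimum_run : Int) : List Bool :=
  if minimum_run ≤ 1 then
    flags.map (fun item => item)   -- [bool(item) for item in flags]; items are Bool already
  else
    pvGoA (flags ++ [false]) 0 (List.replicate flags.length false) none minimum_run

-- ===== PORT B =====
-- _running_sums: total=0; sums=[0]; for v: total+=v, sums.append(total)
def pvScanGo (l : List Int) (total : Int) : List Int :=
  match l with
  | [] => []
  | v :: vs => (total + v) :: pvScanGo vs (total + v)

def pvRunningSums (l : List Int) : List Int := 0 :: pvScanGo l 0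

def apply_min_consecutive_py_alt (flags : List Bool) (minimum_run : Int) : List Bool :=
  let n := flags.length
  let k : Int := max minimum_run 1
  if (n : Int) < k then List.replicate n false
  else
    -- here 1 ≤ k ≤ n, so k.toNat is exact
    let kn := k.toNat
    let pfx := pvRunningSums (flags.map (fun item => if item then (1 : Int) else 0))
    let eroded := pvRunningSums ((List.range (n - kn + 1)).map
      (fun j => if pfx.getD (j + kn) 0 - pfx.getD j 0 == (kn : Int) then (1 : Int) else 0))
    -- max(0, i - k + 1) = i + 1 - kn in truncated Nat subtraction
    (List.range n).map (fun i =>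
      decide (0 < eroded.getD (min i (n - kn) + 1) 0 - eroded.getD (i + 1 - kn) 0))

-- ===== PRECONDITION & SPEC =====
def Spec_apply_min_consecutive_py (flags : List Bool) (minimum_run : Int) (out : List Bool) : Prop := out = apply_min_consecutive_py_alt flags minimum_run
instance (flags : List Bool) (minimum_run : Int) (out : List Bool) : Decidable (Spec_apply_min_consecutive_py flags minimum_run out) := by unfold Spec_apply_min_consecutive_py; infer_instance

-- ===== CLAIM (what is proved, stated in full; the proofs are below) =====
def Claim_equal_apply_min_consecutive_py : Prop := ∀ (flags : List Bool) (minimum_run : Int), Dom_apply_min_consecutive_py flags minimum_run → Spec_apply_min_consecutive_py flags minimum_run (apply_min_consecutive_py flags minimum_run)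

-- ===== LEMMAS AND PROOFS =====

-- ---- shared pointwise characterization: position i is kept iff some all-True
-- ---- window of length kn covers it
def pvWin (flags : List Bool) (kn j : Nat) : Bool :=
  decide (j + kn ≤ flags.length) && (List.range kn).all (fun t => flags.getD (j + t) false)

def pvGood (flags : List Bool) (kn i : Nat) : Bool :=
  (List.range (i + 1)).any (fun j => decide (i < j + kn) && pvWin flags kn j)

-- ---- A-side bridge: the groupby normal form (maximal runs) ----
def pvGroupsB (flags : List Bool) (m : Int) : List Bool :=
  match flags with
  | [] => []
  | x :: xs =>
    let len := (xs.takeWhile (fun y => y == x)).length + 1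
    List.replicate len (x && decide (m ≤ (len : Int))) ++
      pvGroupsB (xs.dropWhile (fun y => y == x)) m
termination_by flags.length
decreasing_by
  exact Nat.lt_succ_of_le (List.length_dropWhile_le _ _)

-- overlay d idx out: write each True of out at its offset position into d
def pvOverlay (d : List Bool) (idx : Nat) (out : List Bool) : List Bool :=
  match out with
  | [] => d
  | b :: bs => pvOverlay (if b then d.set idx true else d) (idx + 1) bs

theorem pvOverlay_append (o1 o2 : List Bool) : ∀ (d : List Bool) (idx : Nat),
    pvOverlay d idx (o1 ++ o2) = pvOverlay (pvOverlay d idx o1) (idx + o1.length) o2 := by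
  induction o1 with
  | nil => simp [pvOverlay]
  | cons b bs ih =>
    intro d idx
    simp [pvOverlay, ih, Nat.add_assoc, Nat.add_comm 1 bs.length]

theorem pvOverlay_replicate_false (k : Nat) : ∀ (d : List Bool) (idx : Nat),
    pvOverlay d idx (List.replicate k false) = d := by
  induction k with
  | zero => intro d idx; rfl
  | succ k ih => intro d idx; simp [List.replicate_succ, pvOverlay, ih]

theorem pvOverlay_replicate_true (k : Nat) : ∀ (d : List Bool) (idx : Nat),
    pvOverlay d idx (List.replicate k true)
      = (List.range' idx k).foldl (fun d i => d.set i true) d := by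
  induction k with
  | zero => intro d idx; rfl
  | succ k ih =>
    intro d idx
    simp [List.replicate_succ, pvOverlay, ih, List.range'_succ]

theorem pv_set_append (d1 : List Bool) : ∀ (t : List Bool) (v : Bool),
    (d1 ++ t).set d1.length v = d1 ++ t.set 0 v := by
  induction d1 with
  | nil => simp
  | cons a as ih => intro t v; simp [List.set, ih]

theorem pvOverlay_full (out : List Bool) : ∀ (d1 d2 : List Bool),
    pvOverlay (d1 ++ List.replicate out.length false ++ d2) d1.length out = d1 ++ out ++ d2 := by
  induction out with
  | nil => intro d1 d2; simp [pvOverlay]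
  | cons b bs ih =>
    intro d1 d2
    have h : (d1 ++ List.replicate (b :: bs).length false ++ d2).set d1.length b
        = (d1 ++ [b]) ++ List.replicate bs.length false ++ d2 := by
      rw [List.append_assoc, pv_set_append]
      simp [List.replicate_succ, List.set, List.append_assoc]
    have step : pvOverlay (d1 ++ List.replicate (b :: bs).length false ++ d2) d1.length (b :: bs)
        = pvOverlay ((d1 ++ [b]) ++ List.replicate bs.length false ++ d2) (d1.length + 1) bs := by
      cases b with
      | true =>
        simp only [pvOverlay, if_true]
        rw [h]
      | false =>
        have h2 : d1 ++ List.replicate (false :: bs).length false ++ d2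
            = (d1 ++ [false]) ++ List.replicate bs.length false ++ d2 := by
          simp [List.replicate_succ]
        simp only [pvOverlay]
        rw [h2]
        simp
    rw [step]
    have hlen : (d1 ++ [b]).length = d1.length + 1 := by simp
    rw [← hlen, ih (d1 ++ [b]) d2]
    simp

theorem pv_takeWhile_eq_replicate (x : Bool) (xs : List Bool) :
    xs.takeWhile (fun y => y == x) = List.replicate (xs.takeWhile (fun y => y == x)).length x := by
  apply List.eq_replicate_of_mem
  intro b hb
  have := List.mem_takeWhile_imp hb
  simpa using this

theorem pv_dropWhile_head (p : Bool → Bool) (xs : List Bool) (y : Bool) (ys : List Bool)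
    (h : xs.dropWhile p = y :: ys) : p y = false := by
  induction xs with
  | nil => simp [List.dropWhile] at h
  | cons a as ih =>
    by_cases hp : p a
    · exact ih (by simpa [List.dropWhile_cons, hp] using h)
    · rw [List.dropWhile_cons, if_neg (by simpa using hp)] at h
      cases h
      simpa using hp

theorem pvGoA_skip_trues (k : Nat) : ∀ (L : List Bool) (idx : Nat) (d : List Bool) (s : Nat) (m : Int),
    pvGoA (List.replicate k true ++ L) idx d (some s) m = pvGoA L (idx + k) d (some s) m := by
  induction k with
  | zero => intro L idx d s m; simp
  | succ k ih =>
    intro L idx d s m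
    rw [List.replicate_succ, List.cons_append]
    show pvGoA (true :: (List.replicate k true ++ L)) idx d (some s) m = _
    simp only [pvGoA]
    rw [if_neg (by simp), if_pos trivial, ih]
    congr 1
    omega

theorem pvGroupsB_false_cons (r : List Bool) (m : Int) : ∀ (d : List Bool) (i : Nat),
    pvOverlay d i (pvGroupsB (false :: r) m) = pvOverlay d (i + 1) (pvGroupsB r m) := by
  intro d i
  have hdecomp := List.takeWhile_append_dropWhile (p := fun y => y == (false : Bool)) (l := r)
  cases hg : r.takeWhile (fun y => y == (false : Bool)) with
  | nil =>
    have hr : r.dropWhile (fun y => y == (false : Bool)) = r := by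
      cases r with
      | nil => rfl
      | cons a t =>
        have ha : ¬ ((a == (false : Bool)) = true) := by
          intro hp
          rw [List.takeWhile_cons, if_pos hp] at hg
          cases hg
        rw [List.dropWhile_cons, if_neg ha]
    simp only [pvGroupsB, hg, hr]
    simp [pvOverlay]
  | cons a t =>
    have ha : a = false := by
      have := List.mem_takeWhile_imp (l := r) (p := fun y => y == (false : Bool))
        (x := a) (by rw [hg]; exact List.mem_cons_self ..)
      simpa using this
    subst ha
    obtain ⟨r', hr'⟩ : ∃ r', r = false :: r' := by
      cases r with
      | nil => simp [List.takeWhile] at hg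
      | cons b bs =>
        cases b with
        | false => exact ⟨bs, rfl⟩
        | true => simp [List.takeWhile] at hg
    subst hr'
    have htail : r'.takeWhile (fun y => y == (false : Bool)) = t := by
      simpa [List.takeWhile] using hg
    have hdrop : (false :: r').dropWhile (fun y => y == (false : Bool))
        = r'.dropWhile (fun y => y == (false : Bool)) := by
      simp [List.dropWhile]
    simp only [pvGroupsB, hg, htail, hdrop, List.length_cons, Bool.false_and]
    rw [pvOverlay_append, pvOverlay_append, pvOverlay_replicate_false, pvOverlay_replicate_false]
    simp [Nat.add_comm, Nat.add_assoc, Nat.add_left_comm]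

theorem pvGoA_eq_overlay : ∀ (n : Nat) (flags : List Bool), flags.length ≤ n →
    ∀ (idx : Nat) (d : List Bool) (m : Int),
    pvGoA (flags ++ [false]) idx d none m = pvOverlay d idx (pvGroupsB flags m) := by
  intro n
  induction n with
  | zero =>
    intro flags hlen idx d m
    have : flags = [] := List.eq_nil_of_length_eq_zero (Nat.le_zero.mp hlen)
    subst this
    simp [pvGoA, pvGroupsB, pvOverlay]
  | succ n ih =>
    intro flags hlen idx d m
    cases flags with
    | nil => simp [pvGoA, pvGroupsB, pvOverlay]
    | cons x xs =>
      have hxs : xs.length ≤ n := Nat.lt_succ_iff.mp (by simpa using hlen)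
      cases x with
      | false =>
        have lhs : pvGoA ((false :: xs) ++ [false]) idx d none m
            = pvGoA (xs ++ [false]) (idx + 1) d none m := by
          simp [pvGoA]
        rw [lhs, ih xs hxs, pvGroupsB_false_cons]
      | true =>
        set g := xs.takeWhile (fun y => y == (true : Bool)) with hgdef
        set r := xs.dropWhile (fun y => y == (true : Bool)) with hrdef
        have hdecomp : g ++ r = xs := List.takeWhile_append_dropWhile
        have hrep : g = List.replicate g.length true := pv_takeWhile_eq_replicate true xs
        set gl := g.length with hgl
        have step1 : pvGoA ((true :: xs) ++ [false]) idx d none m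
            = pvGoA (r ++ [false]) (idx + 1 + gl) d (some idx) m := by
          have : (true :: xs) ++ [false] = true :: (List.replicate gl true ++ (r ++ [false])) := by
            rw [← hdecomp, ← hrep]; simp
          rw [this]
          simp only [pvGoA, Option.isNone_none, Bool.and_self, if_pos]
          simp only [beq_self_eq_true, Bool.and_true, if_pos]
          rw [pvGoA_skip_trues]
        have hflush : ∀ (L : List Bool),
            pvGoA (false :: L) (idx + 1 + gl) d (some idx) m
            = pvGoA L (idx + 1 + gl + 1)
                (if m ≤ ((gl + 1 : Nat) : Int) then
                   (List.range' idx (gl + 1)).foldl (fun d i => d.set i true) d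
                 else d) none m := by
          intro L
          simp only [pvGoA]
          rw [if_neg (by simp : ¬ ((false && ((some idx : Option Nat) == none)) = true)),
              if_neg (by simp : ¬ ((false : Bool) = true))]
          have hsub : idx + 1 + gl - idx = gl + 1 := by omega
          have hcond : (((idx + 1 + gl : Nat) : Int) - (idx : Int) ≥ m) ↔ (m ≤ ((gl + 1 : Nat) : Int)) := by
            push_cast; omega
          have hrange : idx + 1 + gl = idx + (gl + 1) := by omega
          by_cases hm : m ≤ ((gl + 1 : Nat) : Int)
          · rw [if_pos (hcond.mpr hm), if_pos hm, hsub]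
          · rw [if_neg (fun h => hm (hcond.mp h)), if_neg hm]
        have hgrp : pvGroupsB (true :: xs) m
            = List.replicate (gl + 1) (decide (m ≤ ((gl + 1 : Nat) : Int))) ++ pvGroupsB r m := by
          simp only [pvGroupsB, ← hgdef, ← hrdef]
          rw [← hgl]
          simp
        have hovl : ∀ (L : List Bool),
            pvOverlay d idx (List.replicate (gl + 1) (decide (m ≤ ((gl + 1 : Nat) : Int))) ++ L)
            = pvOverlay (if m ≤ ((gl + 1 : Nat) : Int) then
                   (List.range' idx (gl + 1)).foldl (fun d i => d.set i true) d
                 else d) (idx + (gl + 1)) L := by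
          intro L
          rw [pvOverlay_append]
          by_cases hm : m ≤ ((gl + 1 : Nat) : Int)
          · rw [if_pos hm]
            simp only [decide_eq_true hm]
            rw [pvOverlay_replicate_true]
            simp
          · rw [if_neg hm]
            simp only [decide_eq_false hm]
            rw [pvOverlay_replicate_false]
            simp
        rw [step1, hgrp, hovl]
        clear_value g gl r
        cases hrc : r with
        | nil =>
          subst hrc
          simp only [List.nil_append]
          rw [hflush []]
          simp [pvGoA, pvGroupsB, pvOverlay]
        | cons y r' =>
          subst hrc
          have hy : y = false := by
            have hpy := pv_dropWhile_head (fun t => t == (true : Bool)) xs y r' hrdef.symm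
            cases y
            · rfl
            · simp at hpy
          subst hy
          have hr'len : r'.length ≤ n := by
            have h1 := List.length_dropWhile_le (fun t => t == (true : Bool)) xs
            rw [← hrdef] at h1
            simp at h1
            simp at hlen
            omega
          rw [List.cons_append, hflush (r' ++ [false]), ih r' hr'len, pvGroupsB_false_cons]
          congr 1
          omega

-- ---- getD on a replicate-prefix decomposition ----
theorem pv_getD_rep_app (L : Nat) (x : Bool) (r : List Bool) (t : Nat) :
    (List.replicate L x ++ r).getD t false = if t < L then x else r.getD (t - L) false := by
  rcases Nat.lt_or_ge t L with h | h
  · rw [if_pos h, List.getD_append _ _ _ _ (by simpa using h)]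
    simp [List.getD_eq_getElem?_getD, List.getElem?_replicate, h]
  · rw [if_neg (by omega)]
    simp [List.getD_eq_getElem?_getD, List.getElem?_append_right, h]

-- window containing i forces its every inspected position true
theorem pvGood_iff (flags : List Bool) (kn i : Nat) :
    pvGood flags kn i = true ↔ ∃ j, j ≤ i ∧ i < j + kn ∧ j + kn ≤ flags.length ∧
      (∀ t, t < kn → flags.getD (j + t) false = true) := by
  unfold pvGood pvWin
  simp only [List.any_eq_true, List.mem_range, Bool.and_eq_true, decide_eq_true_eq,
    List.all_eq_true]
  constructor
  · rintro ⟨j, hj, hik, hlen, hall⟩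
    exact ⟨j, by omega, hik, hlen, fun t ht => hall t ht⟩
  · rintro ⟨j, hj, hik, hlen, hall⟩
    exact ⟨j, by omega, hik, hlen, fun t ht => hall t ht⟩

-- (a) inside the leading maximal run
theorem pvGood_low (L : Nat) (x : Bool) (r : List Bool) (kn i : Nat)
    (hL : 1 ≤ L) (hkn : 1 ≤ kn) (hi : i < L)
    (hr : ∀ y ys, r = y :: ys → y = !x) :
    pvGood (List.replicate L x ++ r) kn i = (x && decide (kn ≤ L)) := by
  have hlenF : (List.replicate L x ++ r).length = L + r.length := by simp
  cases x with
  | false =>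
    simp only [Bool.false_and]
    by_contra h
    have htrue : pvGood (List.replicate L false ++ r) kn i = true := by
      cases hg : pvGood (List.replicate L false ++ r) kn i
      · exact absurd hg h
      · rfl
    rcases (pvGood_iff _ kn i).mp htrue with ⟨j, hj, hik, hlen, hall⟩
    have ht := hall (i - j) (by omega)
    rw [pv_getD_rep_app] at ht
    rw [if_pos (by omega)] at ht
    cases ht
  | true =>
    by_cases hkL : kn ≤ L
    · rw [decide_eq_true hkL, Bool.and_true]
      apply (pvGood_iff _ kn i).mpr
      refine ⟨min i (L - kn), by omega, by omega, by rw [hlenF]; omega, ?_⟩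
      intro t ht
      rw [pv_getD_rep_app, if_pos (by omega)]
    · rw [decide_eq_false hkL, Bool.and_false]
      by_contra h
      have htrue : pvGood (List.replicate L true ++ r) kn i = true := by
        cases hg : pvGood (List.replicate L true ++ r) kn i
        · exact absurd hg h
        · rfl
      rcases (pvGood_iff _ kn i).mp htrue with ⟨j, hj, hik, hlen, hall⟩
      rw [hlenF] at hlen
      have hjL : L < j + kn := by omega
      have hrlen : 1 ≤ r.length := by omega
      obtain ⟨y, ys, rfl⟩ : ∃ y ys, r = y :: ys := by
        cases r with
        | nil => simp at hrlen
        | cons y ys => exact ⟨y, ys, rfl⟩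
      have hy : y = false := by simpa using hr y ys rfl
      have ht := hall (L - j) (by omega)
      rw [show j + (L - j) = L from by omega, pv_getD_rep_app, if_neg (by omega)] at ht
      simp [hy] at ht

-- (b) past the leading maximal run
theorem pvGood_high (L : Nat) (x : Bool) (r : List Bool) (kn j : Nat)
    (hL : 1 ≤ L) (hkn : 1 ≤ kn) (hj : j < r.length)
    (hr : ∀ y ys, r = y :: ys → y = !x) :
    pvGood (List.replicate L x ++ r) kn (L + j) = pvGood r kn j := by
  have hlenF : (List.replicate L x ++ r).length = L + r.length := by simp
  apply Bool.eq_iff_iff.mpr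
  rw [pvGood_iff, pvGood_iff]
  constructor
  · rintro ⟨j', hj', hik, hlen, hall⟩
    rw [hlenF] at hlen
    have hjL : L ≤ j' := by
      by_contra hlt0
      have hlt : j' < L := by omega
      obtain ⟨y, ys, rfl⟩ : ∃ y ys, r = y :: ys := by
        cases r with
        | nil => simp at hj
        | cons y ys => exact ⟨y, ys, rfl⟩
      have hy : y = !x := hr y ys rfl
      cases x with
      | false =>
        have ht := hall 0 (by omega)
        rw [Nat.add_zero, pv_getD_rep_app, if_pos (by omega)] at ht
        cases ht
      | true =>
        have ht := hall (L - j') (by omega)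
        rw [show j' + (L - j') = L from by omega, pv_getD_rep_app, if_neg (by omega)] at ht
        simp only [Nat.sub_self, List.getD_cons_zero] at ht
        rw [hy] at ht
        cases ht
    refine ⟨j' - L, by omega, by omega, by omega, ?_⟩
    intro t ht
    have h2 := hall t ht
    rw [pv_getD_rep_app, if_neg (by omega)] at h2
    rw [show j' + t - L = j' - L + t from by omega] at h2
    exact h2
  · rintro ⟨j'', hj'', hik, hlen, hall⟩
    refine ⟨L + j'', by omega, by omega, by rw [hlenF]; omega, ?_⟩
    intro t ht
    rw [pv_getD_rep_app, if_neg (by omega), show L + j'' + t - L = j'' + t from by omega]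
    exact hall t ht

-- groups normal form = pointwise window characterization
theorem pvGroupsB_eq_good : ∀ (n : Nat) (flags : List Bool), flags.length ≤ n →
    ∀ (m : Int) (kn : Nat), 1 ≤ kn → (kn : Int) = m →
    pvGroupsB flags m = (List.range flags.length).map (pvGood flags kn) := by
  intro n
  induction n with
  | zero =>
    intro flags hlen m kn _ _
    have : flags = [] := List.eq_nil_of_length_eq_zero (Nat.le_zero.mp hlen)
    subst this
    simp [pvGroupsB]
  | succ n ih =>
    intro flags hlen m kn hkn hkm
    cases flags with
    | nil => simp [pvGroupsB]
    | cons x xs =>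
      set g := xs.takeWhile (fun y => y == x) with hgdef
      set r := xs.dropWhile (fun y => y == x) with hrdef
      have hdecomp : g ++ r = xs := List.takeWhile_append_dropWhile
      have hrep : g = List.replicate g.length x := pv_takeWhile_eq_replicate x xs
      set L := g.length + 1 with hL
      have hF : x :: xs = List.replicate L x ++ r := by
        rw [← hdecomp, hL, List.replicate_succ]
        conv_lhs => rw [hrep]
        simp
      have hlenF : (x :: xs).length = L + r.length := by
        rw [hF]; simp
      have hr : ∀ y ys, r = y :: ys → y = !x := by
        intro y ys hy
        have h2 : xs.dropWhile (fun t => t == x) = y :: ys := by rw [← hrdef]; exact hy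
        have h3 := pv_dropWhile_head (fun t => t == x) xs y ys h2
        cases x <;> cases y <;> first | rfl | (exfalso; simp at h3)
      have hrl : r.length ≤ n := by
        have h1 := List.length_dropWhile_le (fun t => t == x) xs
        rw [← hrdef] at h1
        simp at hlen
        omega
      have hgrp : pvGroupsB (x :: xs) m
          = List.replicate L (x && decide (m ≤ (L : Int))) ++ pvGroupsB r m := by
        simp only [pvGroupsB, ← hgdef, ← hrdef, ← hL]
      rw [hgrp, ih r hrl m kn hkn hkm, hlenF, List.range_add, List.map_append, List.map_map]
      have hdec : decide (m ≤ (L : Int)) = decide (kn ≤ L) := by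
        apply decide_eq_decide.mpr
        omega
      congr 1
      · have hmem : ∀ a ∈ (List.range L).map (pvGood (x :: xs) kn), a = (x && decide (kn ≤ L)) := by
          intro a ha
          rcases List.mem_map.mp ha with ⟨i, hi, rfl⟩
          rw [hF]
          exact pvGood_low L x r kn i (by omega) hkn (List.mem_range.mp hi) hr
        have := List.eq_replicate_of_mem hmem
        rw [this]
        simp [hdec]
      · apply List.map_congr_left
        intro j hj
        simp only [Function.comp]
        rw [hF]
        exact (pvGood_high L x r kn j (by omega) hkn (List.mem_range.mp hj) hr).symm

-- kn = 1 degenerates to the identity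
theorem pvGood_one (flags : List Bool) (i : Nat) (hi : i < flags.length) :
    pvGood flags 1 i = flags.getD i false := by
  cases hf : flags.getD i false with
  | true =>
    rw [(pvGood_iff flags 1 i).mpr ⟨i, le_refl i, by omega, by omega, ?_⟩]
    intro t ht
    have : t = 0 := by omega
    subst this
    simpa using hf
  | false =>
    by_contra h
    have : pvGood flags 1 i = true := by
      cases hg : pvGood flags 1 i
      · exact absurd hg h
      · rfl
    rcases (pvGood_iff flags 1 i).mp this with ⟨j, hj, hik, _, hall⟩
    have hji : j = i := by omega
    subst hji
    have h0 := hall 0 (by omega)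
    simp only [Nat.add_zero] at h0
    rw [h0] at hf
    cases hf

-- ---- scan characterization ----
theorem pvScanGo_getD (l : List Int) : ∀ (t0 : Int) (s : Nat), s < l.length →
    (pvScanGo l t0).getD s 0 = t0 + ((l.take (s + 1)).sum) := by
  induction l with
  | nil => intro t0 s h; simp at h
  | cons v vs ih =>
    intro t0 s h
    cases s with
    | zero => simp [pvScanGo]
    | succ s =>
      have hs : s < vs.length := by simpa using h
      simp only [pvScanGo, List.getD_cons_succ, ih (t0 + v) s hs, List.take_succ_cons,
        List.sum_cons]
      ring

theorem pvRunningSums_getD (l : List Int) (t : Nat) (ht : t ≤ l.length) :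
    (pvRunningSums l).getD t 0 = (l.take t).sum := by
  cases t with
  | zero => simp [pvRunningSums]
  | succ s =>
    have hs : s < l.length := by omega
    simp only [pvRunningSums, List.getD_cons_succ, pvScanGo_getD l 0 s hs]
    ring

theorem pv_sum_ind_nonneg (l : List Int) (h01 : ∀ b ∈ l, b = 0 ∨ b = 1) : 0 ≤ l.sum := by
  induction l with
  | nil => simp
  | cons a as ih =>
    have ha := h01 a (List.mem_cons_self ..)
    have := ih (fun b hb => h01 b (List.mem_cons_of_mem _ hb))
    simp only [List.sum_cons]
    omega

theorem pv_seg_sum_pos (l : List Int) (h01 : ∀ b ∈ l, b = 0 ∨ b = 1) :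
    0 < l.sum ↔ ∃ b ∈ l, b = 1 := by
  induction l with
  | nil => simp
  | cons a as ih =>
    have ha := h01 a (List.mem_cons_self ..)
    have has : ∀ b ∈ as, b = 0 ∨ b = 1 := fun b hb => h01 b (List.mem_cons_of_mem _ hb)
    have hnn := pv_sum_ind_nonneg as has
    rw [List.sum_cons]
    constructor
    · intro h
      rcases ha with h0 | h1
      · subst h0
        rcases (ih has).mp (by omega) with ⟨b, hb, hb1⟩
        exact ⟨b, List.mem_cons_of_mem _ hb, hb1⟩
      · exact ⟨a, List.mem_cons_self .., h1⟩
    · rintro ⟨b, hb, hb1⟩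
      rcases List.mem_cons.mp hb with rfl | hbm
      · omega
      · have := (ih has).mpr ⟨b, hbm, hb1⟩
        omega

theorem pv_ind_sum_le (bs : List Bool) :
    ((bs.map (fun b => if b then (1:Int) else 0)).sum ≤ (bs.length : Int)) := by
  induction bs with
  | nil => simp
  | cons b t ih =>
    simp only [List.map_cons, List.sum_cons, List.length_cons]
    split <;> push_cast <;> omega

theorem pv_ind_sum_eq_len (bs : List Bool) :
    ((bs.map (fun b => if b then (1:Int) else 0)).sum = (bs.length : Int)) ↔ ∀ b ∈ bs, b = true := by
  induction bs with
  | nil => simp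
  | cons b t ih =>
    have hle := pv_ind_sum_le t
    have hnn := pv_sum_ind_nonneg (t.map (fun b => if b then (1:Int) else 0)) (by
      intro a ha
      rcases List.mem_map.mp ha with ⟨c, _, rfl⟩
      split <;> simp)
    simp only [List.map_cons, List.sum_cons, List.length_cons, List.mem_cons]
    constructor
    · intro h
      have hb : b = true := by
        cases b
        · simp at h; push_cast at h; omega
        · rfl
      subst hb
      simp only [if_pos rfl] at h
      have ht : (t.map (fun b => if b then (1:Int) else 0)).sum = (t.length : Int) := by
        push_cast at h ⊢; omega
      intro a ha
      rcases ha with rfl | ha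
      · rfl
      · exact ih.mp ht a ha
    · intro h
      have hb : b = true := h b (Or.inl rfl)
      subst hb
      have ht := ih.mpr (fun a ha => h a (Or.inr ha))
      rw [if_pos rfl, ht]
      push_cast
      ring

-- the erosion test (window sum = kn) is exactly pvWin
theorem pv_window_sum (flags : List Bool) (kn j : Nat) (hj : j + kn ≤ flags.length) :
    ((((pvRunningSums (flags.map (fun item => if item then (1:Int) else 0))).getD (j + kn) 0 -
       (pvRunningSums (flags.map (fun item => if item then (1:Int) else 0))).getD j 0) == (kn : Int))
      = pvWin flags kn j) := by
  have hlen : (flags.map (fun item => if item then (1:Int) else 0)).length = flags.length := by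
    simp
  rw [pvRunningSums_getD _ (j + kn) (by omega), pvRunningSums_getD _ j (by omega)]
  have hsplit : (flags.map (fun item => if item then (1:Int) else 0)).take (j + kn)
      = (flags.map (fun item => if item then (1:Int) else 0)).take j
        ++ (((flags.map (fun item => if item then (1:Int) else 0)).drop j).take kn) := by
    rw [← List.take_add]
  rw [hsplit, List.sum_append, add_sub_cancel_left]
  have hseg : ((flags.map (fun item => if item then (1:Int) else 0)).drop j).take kn
      = ((flags.drop j).take kn).map (fun item => if item then (1:Int) else 0) := by
    simp
  rw [hseg]
  have hbslen : ((flags.drop j).take kn).length = kn := by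
    simp
    omega
  apply Bool.eq_iff_iff.mpr
  rw [beq_iff_eq]
  have hsum := pv_ind_sum_eq_len ((flags.drop j).take kn)
  rw [hbslen] at hsum
  rw [hsum]
  unfold pvWin
  simp only [Bool.and_eq_true, decide_eq_true_eq, List.all_eq_true, List.mem_range]
  constructor
  · intro hall
    refine ⟨hj, fun t ht => ?_⟩
    have htb : t < ((flags.drop j).take kn).length := by omega
    have h1 := hall _ (List.getElem_mem htb)
    have h2 : ((flags.drop j).take kn)[t] = flags[j + t]'(by omega) := by
      simp
    rw [List.getD_eq_getElem _ _ (by omega), ← h2]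
    exact h1
  · rintro ⟨-, hall⟩
    intro b hb
    rcases List.mem_iff_getElem.mp hb with ⟨t, htb, rfl⟩
    have ht : t < kn := by omega
    have h1 := hall t ht
    rw [List.getD_eq_getElem _ _ (by omega)] at h1
    have h2 : ((flags.drop j).take kn)[t] = flags[j + t]'(by omega) := by
      simp
    rw [h2]
    exact h1

-- B computes the pointwise window characterization
theorem pvAlt_eq_good (flags : List Bool) (m : Int) :
    apply_min_consecutive_py_alt flags m
      = (List.range flags.length).map (pvGood flags (max m 1).toNat) := by
  unfold apply_min_consecutive_py_alt
  set n := flags.length with hn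
  set k : Int := max m 1 with hk
  set kn := k.toNat with hkn
  have hk1 : 1 ≤ k := by omega
  by_cases hnk : (n : Int) < k
  · rw [if_pos hnk]
    have hknn : n < kn := by omega
    have hmem : ∀ a ∈ (List.range n).map (pvGood flags kn), a = false := by
      intro a ha
      rcases List.mem_map.mp ha with ⟨i, hi, rfl⟩
      by_contra h
      have htrue : pvGood flags kn i = true := by
        cases hg : pvGood flags kn i
        · exact absurd hg h
        · rfl
      rcases (pvGood_iff flags kn i).mp htrue with ⟨j, _, _, hlen, _⟩
      omega
    have := List.eq_replicate_of_mem hmem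
    rw [this]
    simp
  · rw [if_neg hnk]
    have hkle : kn ≤ n := by omega
    have hkn1 : 1 ≤ kn := by omega
    apply List.map_congr_left
    intro i hi
    have hin : i < n := List.mem_range.mp hi
    set pfx := pvRunningSums (flags.map (fun item => if item then (1:Int) else 0)) with hpfx
    set ws := (List.range (n - kn + 1)).map
      (fun j => if pfx.getD (j + kn) 0 - pfx.getD j 0 == (kn : Int) then (1 : Int) else 0) with hws
    have hwslen : ws.length = n - kn + 1 := by rw [hws]; simp
    set lo := i + 1 - kn with hlo
    set hi1 := min i (n - kn) + 1 with hhi1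
    have hlohi : lo ≤ hi1 := by omega
    have hhiR : hi1 ≤ n - kn + 1 := by omega
    rw [pvRunningSums_getD ws hi1 (by omega), pvRunningSums_getD ws lo (by omega)]
    have hsplit : ws.take hi1 = ws.take lo ++ (ws.drop lo).take (hi1 - lo) := by
      rw [← List.take_add]
      congr 1
      omega
    rw [hsplit, List.sum_append, add_sub_cancel_left]
    set seg := (ws.drop lo).take (hi1 - lo) with hseg
    have hseg01 : ∀ b ∈ seg, b = 0 ∨ b = 1 := by
      intro b hb
      have hbws : b ∈ ws := List.mem_of_mem_drop (List.mem_of_mem_take hb)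
      rcases List.mem_map.mp hbws with ⟨j, _, rfl⟩
      split <;> simp
    have hsegjs : seg = (((List.range (n - kn + 1)).drop lo).take (hi1 - lo)).map
        (fun j => if pfx.getD (j + kn) 0 - pfx.getD j 0 == (kn : Int) then (1 : Int) else 0) := by
      rw [hseg, hws]
      simp
    have hjs : ((List.range (n - kn + 1)).drop lo).take (hi1 - lo) = List.range' lo (hi1 - lo) := by
      apply List.ext_getElem
      · simp
        omega
      · intro t h1 h2
        simp
    apply Bool.eq_iff_iff.mpr
    rw [decide_eq_true_eq, pv_seg_sum_pos seg hseg01, pvGood_iff]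
    constructor
    · rintro ⟨b, hb, rfl⟩
      rw [hsegjs, hjs] at hb
      rcases List.mem_map.mp hb with ⟨j, hjmem, hj1⟩
      rw [List.mem_range'_1] at hjmem
      have hjn : j + kn ≤ n := by omega
      rw [hpfx, pv_window_sum flags kn j hjn] at hj1
      cases hpv : pvWin flags kn j with
      | false => rw [hpv] at hj1; simp at hj1
      | true =>
        unfold pvWin at hpv
        simp only [Bool.and_eq_true, decide_eq_true_eq, List.all_eq_true, List.mem_range] at hpv
        exact ⟨j, by omega, by omega, hpv.1, fun t ht => hpv.2 t ht⟩
    · rintro ⟨j, hji, hik, hjn, hall⟩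
      have hw : pvWin flags kn j = true := by
        unfold pvWin
        simp only [Bool.and_eq_true, decide_eq_true_eq, List.all_eq_true, List.mem_range]
        exact ⟨hjn, fun t ht => hall t ht⟩
      refine ⟨1, ?_, rfl⟩
      rw [hsegjs, hjs]
      apply List.mem_map.mpr
      refine ⟨j, ?_, ?_⟩
      · rw [List.mem_range'_1]
        omega
      · have hc : (pfx.getD (j + kn) 0 - pfx.getD j 0 == (kn : Int)) = true := by
          rw [hpfx, pv_window_sum flags kn j (by omega)]
          exact hw
        rw [if_pos hc]

-- ===== VERDICT (by name: the statement is the Claim_ definition above) =====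
theorem apply_min_consecutive_py_spec : Claim_equal_apply_min_consecutive_py := by
  intro flags m _
  unfold Spec_apply_min_consecutive_py
  rw [pvAlt_eq_good]
  unfold apply_min_consecutive_py
  by_cases hm : m ≤ 1
  · rw [if_pos hm]
    have hk : (max m 1).toNat = 1 := by omega
    rw [hk]
    apply List.ext_getElem
    · simp
    · intro i h1 h2
      simp only [List.getElem_map, List.getElem_range, List.map_id']
      have hi : i < flags.length := by simpa using h1
      rw [pvGood_one flags i hi, List.getD_eq_getElem _ _ hi]
  · rw [if_neg hm]
    have hk : ((max m 1).toNat : Int) = m := by omega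
    have h1 : 1 ≤ (max m 1).toNat := by omega
    rw [pvGoA_eq_overlay flags.length flags le_rfl 0 _ m]
    rw [pvGroupsB_eq_good flags.length flags le_rfl m _ h1 hk]
    have hlen : ((List.range flags.length).map (pvGood flags (max m 1).toNat)).length = flags.length := by
      simp
    have := pvOverlay_full ((List.range flags.length).map (pvGood flags (max m 1).toNat)) [] []
    simpa [hlen] using this
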